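-- pv_equiv track=rewrite | github.com/Benji07p/NSI-Repository | ex2.py | table_de_decalage
-- ===== SOURCE A (Python) =====
-- def table_de_decalage(motif):
--     '''renvoie la liste des dictionnaires permettant de récapituler les décalages'''
--     tab = [{'autre': 1}]
--     for j in range(1, len(motif)):
--         dico = {cle: val+1 for cle, val in tab[j-1].items()}
--         dico[motif[j-1]] = 1
--         if motif[j] in dico:
--             dico.pop(motif[j])
--         tab.append(dico)
--     return tab
-- ===== SOURCE B (Python) =====
-- def table_de_decalage(motif):
--     '''renvoie la liste des dictionnaires permettant de récapituler les décalages'''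
--     tab = [{'autre': 1}]
--     distinct = set()
--     for j in range(1, len(motif)):
--         distinct.add(motif[j - 1])
--         # One backward scan of motif[:j]: the first time a character is seen
--         # (i.e. its LAST occurrence, at distance k from position j) yields the
--         # shift k; motif[j] itself is excluded.  The scan stops as soon as every
--         # distinct character of the prefix has been accounted for.  Entries come
--         # out in reverse order, so the dict is filled from the reversed list.
--         entries = []
--         seen = {motif[j]}
--         need = len(distinct) - (1 if motif[j] in distinct else 0)
--         k = 1
--         for c in reversed(motif[:j]):
--             if need == 0:
--                 break
--             if c not in seen:
--                 seen.add(c)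
--                 entries.append((c, k))
--                 need -= 1
--             k += 1
--         dico = {'autre': j + 1}
--         for c, v in reversed(entries):
--             dico[c] = v
--         tab.append(dico)
--     return tab
-- ===== Notes on version B (the rewrite author's own statement) =====
-- stated objective: alternative
-- what changed: B recomputes each position's dict directly from the prefix by one backward scan collecting last occurrences (entry list built back-to-front, stopping once every distinct prefix character is seen), instead of A's threading of a running dict whose values are incremented, overwritten and popped step by step.
import Mathlib
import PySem

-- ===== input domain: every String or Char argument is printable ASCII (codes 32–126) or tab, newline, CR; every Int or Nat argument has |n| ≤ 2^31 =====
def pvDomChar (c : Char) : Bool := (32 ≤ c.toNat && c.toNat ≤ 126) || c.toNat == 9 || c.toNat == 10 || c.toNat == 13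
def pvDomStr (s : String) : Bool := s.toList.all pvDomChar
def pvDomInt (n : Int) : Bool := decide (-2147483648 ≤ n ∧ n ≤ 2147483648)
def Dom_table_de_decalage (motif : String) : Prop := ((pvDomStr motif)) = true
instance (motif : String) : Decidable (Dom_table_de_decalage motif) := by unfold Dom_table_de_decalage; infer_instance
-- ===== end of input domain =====

-- B recomputes each per-position dict directly from the prefix by one backward scan
-- collecting last occurrences (entry list built back-to-front), instead of A's running
-- dict of incremented/overwritten/popped values; objective: alternative (same cost class).

-- ===== PORT A =====
-- loop body of A: dico = {cle: val+1 …}; dico[motif[j-1]] = 1; if motif[j] in dico: dico.pop(motif[j]); tab.append(dico)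
def pvStepA (m : List Char) (tab : List (PySem.Dict String Int)) (j : Int) : List (PySem.Dict String Int) :=
  let prev := PySem.List.pyGetD tab (j - 1) PySem.Dict.empty
  let dico := PySem.Dict.ofList (prev.items.map (fun p => (p.1, p.2 + 1)))
  let dico := dico.insert (String.singleton (PySem.List.pyGetD m (j - 1) ' ')) 1
  let cj := String.singleton (PySem.List.pyGetD m j ' ')
  let dico := if dico.contains cj then dico.erase cj else dico
  tab ++ [dico]

def table_de_decalage (motif : String) : List (List (String × Int)) :=
  ((PySem.List.pyRange 1 (PySem.Str.len motif) 1).foldl (pvStepA motif.toList)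
    [PySem.Dict.ofList [("autre", 1)]]).map PySem.Dict.items

-- ===== PORT B =====
-- inner loop of B: for c in reversed(motif[:j]): if need == 0: break;
--   if c not in seen: seen.add(c); entries.append((c, k)); need -= 1;  k += 1
def pvScan (cs : List Char) (seen : PySem.Set String) (k : Int) (need : Int) : List (String × Int) :=
  match cs with
  | [] => []
  | c :: rest =>
    if need == 0 then []
    else if PySem.Set.contains seen (String.singleton c) then pvScan rest seen (k + 1) need
    else (String.singleton c, k) :: pvScan rest (PySem.Set.add seen (String.singleton c)) (k + 1) (need - 1)

-- loop body of B: distinct.add(motif[j-1]); need = len(distinct) - (1 if motif[j] in distinct else 0);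
-- entries by backward scan of motif[:j] stopping at need == 0; dico = {'autre': j+1} filled from reversed(entries)
def pvStepB (m : List Char) (st : List (PySem.Dict String Int) × PySem.Set String) (j : Int) :
    List (PySem.Dict String Int) × PySem.Set String :=
  let distinct := PySem.Set.add st.2 (String.singleton (PySem.List.pyGetD m (j - 1) ' '))
  let cj := String.singleton (PySem.List.pyGetD m j ' ')
  let need := PySem.Set.len distinct - (if PySem.Set.contains distinct cj then 1 else 0)
  let entries := pvScan (PySem.List.slice m none (some j)).reverse (PySem.Set.ofList [cj]) 1 need
  let dico := entries.reverse.foldl (fun d (p : String × Int) => d.insert p.1 p.2)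
      (PySem.Dict.ofList [("autre", j + 1)])
  (st.1 ++ [dico], distinct)

def table_de_decalage_alt (motif : String) : List (List (String × Int)) :=
  (((PySem.List.pyRange 1 (PySem.Str.len motif) 1).foldl (pvStepB motif.toList)
    ([PySem.Dict.ofList [("autre", 1)]], PySem.Set.empty)).1).map PySem.Dict.items

-- ===== PRECONDITION & SPEC =====
def Spec_table_de_decalage (motif : String) (out : List (List (String × Int))) : Prop := out = table_de_decalage_alt motif
instance (motif : String) (out : List (List (String × Int))) : Decidable (Spec_table_de_decalage motif out) := by unfold Spec_table_de_decalage; infer_instance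

-- ===== CLAIM (what is proved, stated in full; the proofs are below) =====
def Claim_equal_table_de_decalage : Prop := ∀ (motif : String), Dom_table_de_decalage motif → Spec_table_de_decalage motif (table_de_decalage motif)

-- ===== LEMMAS AND PROOFS =====

-- proof-side scan without the early break (what B computes once the break is
-- shown to cut only characters that contribute nothing)
def pvScanFull (cs : List Char) (seen : PySem.Set String) (k : Int) : List (String × Int) :=
  match cs with
  | [] => []
  | c :: rest =>
    if PySem.Set.contains seen (String.singleton c) then pvScanFull rest seen (k + 1)
    else (String.singleton c, k) :: pvScanFull rest (PySem.Set.add seen (String.singleton c)) (k + 1)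


def pvEnt (m : List Char) (j : Nat) : List (String × Int) :=
  (pvScanFull (m.take j).reverse (PySem.Set.ofList [String.singleton (m.getD j ' ')]) 1).reverse

def pvBd (m : List Char) (j : Nat) : List (String × Int) := ("autre", (j : Int) + 1) :: pvEnt m j

def pvTab (m : List Char) (j : Nat) : List (PySem.Dict String Int) :=
  (List.range j).map (fun i => ⟨pvBd m i⟩)

lemma pvScanFull_mem (cs : List Char) (seen : PySem.Set String) (k : Int) (p : String × Int)
    (hp : p ∈ pvScanFull cs seen k) : p.1 ∉ seen ∧ ∃ c ∈ cs, p.1 = String.singleton c := by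
  induction cs generalizing seen k with
  | nil => simp [pvScanFull] at hp
  | cons c rest ih =>
    rw [pvScanFull] at hp
    by_cases h : PySem.Set.contains seen (String.singleton c) = true
    · rw [if_pos h] at hp
      obtain ⟨h1, c', hc', he⟩ := ih _ _ hp
      exact ⟨h1, c', List.mem_cons_of_mem _ hc', he⟩
    · rw [if_neg h] at hp
      rcases List.mem_cons.1 hp with rfl | hp'
      · refine ⟨?_, c, by simp, rfl⟩
        simpa [PySem.Set.contains] using h
      · obtain ⟨h1, c', hc', he⟩ := ih _ _ hp'
        refine ⟨?_, c', List.mem_cons_of_mem _ hc', he⟩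
        intro hm; exact h1 ((PySem.Set.mem_add _ _ _).2 (Or.inl hm))

lemma pvScanFull_congr (cs : List Char) (seen seen' : PySem.Set String) (k : Int)
    (h : ∀ y, y ∈ seen ↔ y ∈ seen') : pvScanFull cs seen k = pvScanFull cs seen' k := by
  induction cs generalizing seen seen' k with
  | nil => rfl
  | cons c rest ih =>
    have hc : PySem.Set.contains seen (String.singleton c)
        = PySem.Set.contains seen' (String.singleton c) := by
      simp [PySem.Set.contains, h]
    rw [pvScanFull, pvScanFull, ← hc]
    by_cases hb : PySem.Set.contains seen (String.singleton c) = true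
    · rw [if_pos hb, if_pos hb]; exact ih _ _ _ h
    · rw [if_neg hb, if_neg hb]
      congr 1
      exact ih _ _ _ (fun y => by
        rw [PySem.Set.mem_add, PySem.Set.mem_add, h y])

lemma pvScanFull_shift (cs : List Char) (seen : PySem.Set String) (k : Int) :
    pvScanFull cs seen (k + 1) = (pvScanFull cs seen k).map (fun p : String × Int => (p.1, p.2 + 1)) := by
  induction cs generalizing seen k with
  | nil => rfl
  | cons c rest ih =>
    rw [pvScanFull, pvScanFull]
    by_cases hb : PySem.Set.contains seen (String.singleton c) = true
    · rw [if_pos hb, if_pos hb, ih]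
    · rw [if_neg hb, if_neg hb, List.map_cons, ih]

lemma pvScanFull_keys_nodup (cs : List Char) (seen : PySem.Set String) (k : Int) :
    (pvScanFull cs seen k).Pairwise (fun p q => p.1 ≠ q.1) := by
  induction cs generalizing seen k with
  | nil => simp [pvScanFull]
  | cons c rest ih =>
    rw [pvScanFull]
    by_cases hb : PySem.Set.contains seen (String.singleton c) = true
    · rw [if_pos hb]; exact ih _ _
    · rw [if_neg hb]
      refine List.Pairwise.cons (fun q hq => ?_) (ih _ _)
      have := (pvScanFull_mem _ _ _ _ hq).1
      intro he
      exact this ((PySem.Set.mem_add _ _ _).2 (Or.inr he.symm))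

lemma pvScanFull_filter_of_mem (cs : List Char) (seen : PySem.Set String) (k : Int) (x : String)
    (hx : x ∈ seen) : (pvScanFull cs seen k).filter (fun p => !(p.1 == x)) = pvScanFull cs seen k := by
  apply List.filter_eq_self.2
  intro p hp
  have h1 := (pvScanFull_mem _ _ _ _ hp).1
  simp only [Bool.not_eq_eq_eq_not, Bool.not_true, beq_eq_false_iff_ne, ne_eq]
  intro he; exact h1 (he ▸ hx)

lemma pvScanFull_add (cs : List Char) (seen : PySem.Set String) (k : Int) (x : String)
    (hx : x ∉ seen) :
    pvScanFull cs (PySem.Set.add seen x) k = (pvScanFull cs seen k).filter (fun p => !(p.1 == x)) := by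
  induction cs generalizing seen k with
  | nil => rfl
  | cons c rest ih =>
    rw [pvScanFull, pvScanFull]
    by_cases hb : PySem.Set.contains seen (String.singleton c) = true
    · have hb' : PySem.Set.contains (PySem.Set.add seen x) (String.singleton c) = true := by
        simp only [PySem.Set.contains, List.contains_iff_mem] at hb ⊢
        exact (PySem.Set.mem_add _ _ _).2 (Or.inl hb)
      rw [if_pos hb, if_pos hb']
      exact ih _ _ hx
    · by_cases hcx : String.singleton c = x
      · subst hcx
        have hb' : PySem.Set.contains (PySem.Set.add seen (String.singleton c))
            (String.singleton c) = true := by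
          simp only [PySem.Set.contains, List.contains_iff_mem]
          exact (PySem.Set.mem_add _ _ _).2 (Or.inr rfl)
        rw [if_pos hb', if_neg hb]
        rw [List.filter_cons_of_neg (by simp)]
        exact (pvScanFull_filter_of_mem _ _ _ _ ((PySem.Set.mem_add _ _ _).2 (Or.inr rfl))).symm
      · have hb0 : String.singleton c ∉ seen := by
          simpa [PySem.Set.contains] using hb
        have hb' : ¬ PySem.Set.contains (PySem.Set.add seen x) (String.singleton c) = true := by
          simp only [PySem.Set.contains, List.contains_iff_mem]
          intro hm
          rcases (PySem.Set.mem_add _ _ _).1 hm with h | h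
          · exact hb0 h
          · exact hcx h
        rw [if_neg hb', if_neg hb]
        rw [List.filter_cons_of_pos (by simp [hcx])]
        congr 1
        rw [pvScanFull_congr rest _ (PySem.Set.add (PySem.Set.add seen (String.singleton c)) x) _
          (fun y => by rw [PySem.Set.mem_add, PySem.Set.mem_add, PySem.Set.mem_add,
            PySem.Set.mem_add]; tauto)]
        exact ih _ _ (fun hm => by
          rcases (PySem.Set.mem_add _ _ _).1 hm with h | h
          · exact hx h
          · exact hcx h.symm)

lemma sing_inj {c x : Char} (h : String.singleton c = String.singleton x) : c = x := by
  have := congrArg String.toList h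
  simpa using this

lemma sing_ne_autre (c : Char) : String.singleton c ≠ "autre" := by
  intro h
  have := congrArg String.toList h
  simp at this

lemma pvScanFull_cons (c : Char) (rest : List Char) (seen : PySem.Set String) (k : Int) :
    pvScanFull (c :: rest) seen k =
      if PySem.Set.contains seen (String.singleton c) then pvScanFull rest seen (k + 1)
      else (String.singleton c, k) :: pvScanFull rest (PySem.Set.add seen (String.singleton c)) (k + 1) := rfl

lemma stepE (s : List Char) (c x : Char) :
    (((pvScanFull s.reverse (PySem.Set.ofList [String.singleton c]) 1).reverse.map
        (fun p : String × Int => (p.1, p.2 + 1)) ++ [(String.singleton c, 1)]).filter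
        (fun p : String × Int => !(p.1 == String.singleton x)))
    = (pvScanFull (s ++ [c]).reverse (PySem.Set.ofList [String.singleton x]) 1).reverse := by
  have hof : ∀ y : String, PySem.Set.ofList [y] = [y] := fun y => rfl
  have hcomp : ∀ (y : String) (l : List (String × Int)),
      (l.map (fun p : String × Int => (p.1, p.2 + 1))).filter (fun p => !(p.1 == y))
      = (l.filter (fun p => !(p.1 == y))).map (fun p : String × Int => (p.1, p.2 + 1)) := by
    intro y l
    rw [List.filter_map]
    rfl
  rw [List.reverse_append]
  simp only [List.reverse_cons, List.reverse_nil, List.nil_append, List.singleton_append]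
  rw [pvScanFull_cons]
  by_cases hcx : c = x
  · subst hcx
    have hc : PySem.Set.contains (PySem.Set.ofList [String.singleton c]) (String.singleton c) = true := by
      simp [PySem.Set.contains, hof]
    rw [if_pos hc, pvScanFull_shift, List.filter_append,
      List.filter_cons_of_neg (by simp), List.filter_nil, List.append_nil,
      ← List.map_reverse, hcomp, List.filter_reverse,
      pvScanFull_filter_of_mem _ _ _ _ (by rw [hof]; simp), List.map_reverse]
  · have hbne : (String.singleton c == String.singleton x) = false := by
      simp only [beq_eq_false_iff_ne, ne_eq]
      intro h; exact hcx (sing_inj h)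
    have hc : ¬ PySem.Set.contains (PySem.Set.ofList [String.singleton x]) (String.singleton c) = true := by
      simp only [PySem.Set.contains, hof, List.contains_iff_mem, List.mem_singleton]
      intro h; exact hcx (sing_inj h)
    rw [if_neg hc, List.reverse_cons, pvScanFull_shift]
    have h1 : pvScanFull s.reverse ((PySem.Set.ofList [String.singleton x]).add (String.singleton c)) 1
        = pvScanFull s.reverse ((PySem.Set.ofList [String.singleton c]).add (String.singleton x)) 1 :=
      pvScanFull_congr _ _ _ _ (fun y => by
        rw [PySem.Set.mem_add, PySem.Set.mem_add, hof, hof]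
        simp only [List.mem_singleton]
        tauto)
    have h2 : pvScanFull s.reverse ((PySem.Set.ofList [String.singleton c]).add (String.singleton x)) 1
        = (pvScanFull s.reverse (PySem.Set.ofList [String.singleton c]) 1).filter
            (fun p : String × Int => !(p.1 == String.singleton x)) :=
      pvScanFull_add _ _ _ _ (by
        rw [hof]
        simp only [List.mem_singleton]
        intro h; exact hcx (sing_inj h.symm))
    rw [h1, h2]
    rw [List.filter_append, ← List.map_reverse, hcomp, List.filter_reverse,
      List.filter_cons_of_pos (by simp [hbne]), List.filter_nil, List.map_reverse]

lemma foldl_insert_items (l : List (String × Int)) (d : PySem.Dict String Int)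
    (hfresh : ∀ p ∈ l, d.contains p.1 = false)
    (hnd : l.Pairwise (fun p q => p.1 ≠ q.1)) :
    (l.foldl (fun d (p : String × Int) => d.insert p.1 p.2) d).items = d.items ++ l := by
  induction l generalizing d with
  | nil => simp
  | cons p t ih =>
    rw [List.foldl_cons]
    obtain ⟨hhd, htl⟩ := List.pairwise_cons.1 hnd
    have hins : (d.insert p.1 p.2).items = d.items ++ [p] := by
      rw [PySem.Dict.items_insert_of_not_contains _ _ (hfresh p (by simp))]
    rw [ih _ ?_ htl, hins, List.append_assoc, List.singleton_append]
    intro q hq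
    have h1 := hfresh q (by simp [hq])
    simp only [PySem.Dict.contains, hins, List.any_append, List.any_cons, List.any_nil] at h1 ⊢
    simp only [h1, Bool.false_or, Bool.or_false]
    exact beq_eq_false_iff_ne.2 (hhd q hq)

lemma ofList_eq_mk (l : List (String × Int)) (hnd : l.Pairwise (fun p q => p.1 ≠ q.1)) :
    PySem.Dict.ofList l = ⟨l⟩ := by
  have h : (PySem.Dict.ofList l).items = l := by
    have := foldl_insert_items l PySem.Dict.empty (fun p _ => rfl) hnd
    simpa [PySem.Dict.ofList, PySem.Dict.update] using this
  calc PySem.Dict.ofList l = ⟨(PySem.Dict.ofList l).items⟩ := rfl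
    _ = ⟨l⟩ := by rw [h]

lemma items_filter_of_not_contains (d : PySem.Dict String Int) (k : String)
    (h : d.contains k = false) : d.items.filter (fun p => !(p.1 == k)) = d.items := by
  apply List.filter_eq_self.2
  intro p hp
  simp only [PySem.Dict.contains, List.any_eq_false] at h
  simpa using h p hp

lemma pvEnt_pairwise (m : List Char) (j : Nat) :
    (pvEnt m j).Pairwise (fun p q => p.1 ≠ q.1) := by
  rw [pvEnt, List.pairwise_reverse]
  exact (pvScanFull_keys_nodup _ _ _).imp (fun h => h.symm)

lemma pvEnt_key (m : List Char) (j : Nat) (p : String × Int) (hp : p ∈ pvEnt m j) :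
    (∃ c, p.1 = String.singleton c) ∧ p.1 ≠ String.singleton (m.getD j ' ') := by
  rw [pvEnt, List.mem_reverse] at hp
  obtain ⟨h1, c, _, he⟩ := pvScanFull_mem _ _ _ _ hp
  refine ⟨⟨c, he⟩, fun h => h1 ?_⟩
  rw [h]
  exact List.mem_singleton_self _

lemma pvBd_pairwise (m : List Char) (i : Nat) :
    (pvBd m i).Pairwise (fun p q => p.1 ≠ q.1) := by
  rw [pvBd]
  refine List.Pairwise.cons (fun q hq => ?_) (pvEnt_pairwise m i)
  obtain ⟨⟨c, hc⟩, _⟩ := pvEnt_key m i q hq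
  rw [hc]
  exact (sing_ne_autre c).symm

lemma autre_beq_sing (c : Char) : (("autre" : String) == String.singleton c) = false :=
  beq_eq_false_iff_ne.2 (sing_ne_autre c).symm

lemma pvStepA_tab (m : List Char) (j : Nat) (h1 : 1 ≤ j) (h2 : j < m.length) :
    pvStepA m (pvTab m j) (j : Int) = pvTab m (j + 1) := by
  have hj1 : j - 1 < m.length := by omega
  have hcast : (j : Int) - 1 = ((j - 1 : Nat) : Int) := by omega
  have hprev : PySem.List.pyGetD (pvTab m j) ((j : Int) - 1) PySem.Dict.empty
      = ⟨pvBd m (j - 1)⟩ := by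
    rw [hcast, PySem.List.pyGetD_natCast, pvTab, List.getD_eq_getElem?_getD,
      List.getElem?_eq_getElem (by simp; omega)]
    simp
  have hm1 : PySem.List.pyGetD m ((j : Int) - 1) ' ' = m.getD (j - 1) ' ' := by
    rw [hcast, PySem.List.pyGetD_natCast]
  have hmj : PySem.List.pyGetD m (j : Int) ' ' = m.getD j ' ' := by
    rw [PySem.List.pyGetD_natCast]
  simp only [pvStepA, hprev, hm1, hmj]
  -- the bumped previous items
  have hl0 : (pvBd m (j - 1)).map (fun p : String × Int => (p.1, p.2 + 1))
      = ("autre", (j : Int) + 1) :: (pvEnt m (j - 1)).map (fun p : String × Int => (p.1, p.2 + 1)) := by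
    rw [pvBd, List.map_cons]
    congr 2
    omega
  have hnd0 : ((pvBd m (j - 1)).map (fun p : String × Int => (p.1, p.2 + 1))).Pairwise
      (fun p q => p.1 ≠ q.1) := List.pairwise_map.mpr (pvBd_pairwise m (j - 1))
  rw [ofList_eq_mk _ hnd0]
  have hfresh1 : (⟨(pvBd m (j - 1)).map (fun p : String × Int => (p.1, p.2 + 1))⟩ :
      PySem.Dict String Int).contains (String.singleton (m.getD (j - 1) ' ')) = false := by
    simp only [PySem.Dict.contains, List.any_eq_false]
    intro p hp
    rw [hl0] at hp
    rcases List.mem_cons.1 hp with rfl | hp'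
    · simpa using autre_beq_sing (m.getD (j - 1) ' ')
    · obtain ⟨q, hq, rfl⟩ := List.mem_map.1 hp'
      obtain ⟨_, hne⟩ := pvEnt_key m (j - 1) q hq
      simpa using hne
  have hins := PySem.Dict.items_insert_of_not_contains
    (⟨(pvBd m (j - 1)).map (fun p : String × Int => (p.1, p.2 + 1))⟩ : PySem.Dict String Int)
    (1 : Int) hfresh1
  -- the conditional pop is a filter in both branches
  have hfilt : ∀ (d : PySem.Dict String Int) (k : String),
      (if d.contains k then d.erase k else d) = ⟨d.items.filter (fun p => !(p.1 == k))⟩ := by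
    intro d k
    by_cases hc : d.contains k = true
    · rw [if_pos hc]; rfl
    · rw [if_neg hc]
      calc d = ⟨d.items⟩ := rfl
        _ = ⟨d.items.filter (fun p => !(p.1 == k))⟩ := by
            rw [items_filter_of_not_contains d k (by simpa using hc)]
  rw [hfilt, hins, hl0]
  have htake : m.take (j - 1) ++ [m.getD (j - 1) ' '] = m.take j := by
    conv_rhs => rw [show j = (j - 1) + 1 by omega]
    rw [List.take_add_one, List.getElem?_eq_getElem hj1]
    rw [List.getD_eq_getElem?_getD, List.getElem?_eq_getElem hj1]
    rfl
  have hstep := stepE (m.take (j - 1)) (m.getD (j - 1) ' ') (m.getD j ' ')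
  rw [htake] at hstep
  rw [List.cons_append, List.filter_cons_of_pos (by simpa using autre_beq_sing (m.getD j ' '))]
  have hstep2 : ((pvEnt m (j-1)).map (fun p : String × Int => (p.1, p.2 + 1))
      ++ [(String.singleton (m.getD (j-1) ' '), 1)]).filter
        (fun p : String × Int => !(p.1 == String.singleton (m.getD j ' ')))
      = pvEnt m j := by
    unfold pvEnt
    exact hstep
  rw [hstep2]
  rw [pvTab, pvTab, List.range_succ, List.map_append]
  rfl

def pvDist (m : List Char) (i : Nat) : PySem.Set String :=
  PySem.Set.ofList ((m.take i).map String.singleton)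

lemma contains_add_eq (s : PySem.Set String) (x y : String) :
    PySem.Set.contains (PySem.Set.add s x) y = (PySem.Set.contains s y || y == x) := by
  simp only [PySem.Set.contains]
  by_cases h1 : y ∈ s
  · rw [List.contains_iff_mem.2 h1, Bool.true_or]
    exact List.contains_iff_mem.2 ((PySem.Set.mem_add s x y).2 (Or.inl h1))
  · have hs : List.contains s y = false := by
      simpa [List.contains_iff_mem] using h1
    rw [hs, Bool.false_or]
    by_cases h2 : y = x
    · subst h2
      rw [beq_self_eq_true]
      exact List.contains_iff_mem.2 ((PySem.Set.mem_add s y y).2 (Or.inr rfl))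
    · rw [beq_eq_false_iff_ne.2 h2]
      have hm : y ∉ PySem.Set.add s x := fun hm => by
        rcases (PySem.Set.mem_add s x y).1 hm with h | h
        exacts [h1 h, h2 h]
      simpa [List.contains_iff_mem] using hm

lemma pvScanFull_all_seen (cs : List Char) (seen : PySem.Set String) (k : Int)
    (h : ∀ c ∈ cs, String.singleton c ∈ seen) : pvScanFull cs seen k = [] := by
  induction cs generalizing seen k with
  | nil => rfl
  | cons c rest ih =>
    rw [pvScanFull_cons,
      if_pos (by simpa [PySem.Set.contains, List.contains_iff_mem] using h c (by simp))]
    exact ih _ _ (fun c' hc' => h c' (by simp [hc']))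

lemma pvScan_cons (c : Char) (rest : List Char) (seen : PySem.Set String) (k need : Int) :
    pvScan (c :: rest) seen k need =
      if need == 0 then []
      else if PySem.Set.contains seen (String.singleton c) then pvScan rest seen (k + 1) need
      else (String.singleton c, k) ::
        pvScan rest (PySem.Set.add seen (String.singleton c)) (k + 1) (need - 1) := rfl

-- the break in B's scan only cuts characters that contribute nothing: with an exact
-- count of the not-yet-seen distinct characters, the broken scan equals the full one
lemma pvScan_eq_full (D : List String) (hD : D.Nodup) :
    ∀ (cs : List Char) (seen : PySem.Set String) (k need : Int),
      (∀ c ∈ cs, String.singleton c ∈ D) →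
      need = ((D.filter (fun y => !(PySem.Set.contains seen y))).length : Int) →
      pvScan cs seen k need = pvScanFull cs seen k := by
  intro cs
  induction cs with
  | nil => intro seen k need _ _; rfl
  | cons c rest ih =>
    intro seen k need hsub hneed
    rw [pvScan_cons, pvScanFull_cons]
    by_cases h0 : need = 0
    · have hlen0 : (D.filter (fun y => !(PySem.Set.contains seen y))) = [] := by
        rw [← List.length_eq_zero_iff]
        omega
      have hall : ∀ y ∈ D, y ∈ seen := by
        intro y hy
        by_contra hy2
        have hmem : y ∈ D.filter (fun y => !(PySem.Set.contains seen y)) :=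
          List.mem_filter.2 ⟨hy, by simpa [PySem.Set.contains, List.contains_iff_mem] using hy2⟩
        rw [hlen0] at hmem
        simp at hmem
      have hcseen : PySem.Set.contains seen (String.singleton c) = true := by
        simpa [PySem.Set.contains, List.contains_iff_mem] using hall _ (hsub c (by simp))
      rw [if_pos (by simp [h0]), if_pos hcseen]
      exact (pvScanFull_all_seen rest seen (k + 1)
        (fun c' hc' => hall _ (hsub c' (by simp [hc'])))).symm
    · rw [if_neg (by simpa using h0)]
      by_cases hc : PySem.Set.contains seen (String.singleton c) = true
      · rw [if_pos hc, if_pos hc]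
        exact ih seen (k + 1) need (fun c' hc' => hsub c' (by simp [hc'])) hneed
      · rw [if_neg hc, if_neg hc]
        congr 1
        apply ih _ (k + 1) (need - 1) (fun c' hc' => hsub c' (by simp [hc']))
        have hsc : String.singleton c ∈ D.filter (fun y => !(PySem.Set.contains seen y)) :=
          List.mem_filter.2 ⟨hsub c (by simp), by simpa using hc⟩
        have hfilt2 : D.filter (fun y => !(PySem.Set.contains (PySem.Set.add seen (String.singleton c)) y))
            = (D.filter (fun y => !(PySem.Set.contains seen y))).filter
                (fun y => y != String.singleton c) := by
          rw [List.filter_filter]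
          apply List.filter_congr
          intro y _
          rw [contains_add_eq]
          cases PySem.Set.contains seen y <;> cases hbe : (y == String.singleton c) <;>
            simp [bne, hbe]
        have hnodupf : (D.filter (fun y => !(PySem.Set.contains seen y))).Nodup :=
          hD.filter _
        have hpos : 0 < (D.filter (fun y => !(PySem.Set.contains seen y))).length :=
          List.length_pos_of_mem hsc
        rw [hfilt2, ← hnodupf.erase_eq_filter, List.length_erase_of_mem hsc]
        omega

lemma pvTake_step (m : List Char) (j : Nat) (h1 : 1 ≤ j) (h2 : j ≤ m.length) :
    m.take (j - 1) ++ [m.getD (j - 1) ' '] = m.take j := by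
  have hj1 : j - 1 < m.length := by omega
  conv_rhs => rw [show j = (j - 1) + 1 by omega]
  rw [List.take_add_one, List.getElem?_eq_getElem hj1]
  rw [List.getD_eq_getElem?_getD, List.getElem?_eq_getElem hj1]
  rfl

lemma pvDist_step (m : List Char) (j : Nat) (h1 : 1 ≤ j) (h2 : j ≤ m.length) :
    PySem.Set.add (pvDist m (j - 1)) (String.singleton (m.getD (j - 1) ' ')) = pvDist m j := by
  unfold pvDist
  rw [← pvTake_step m j h1 h2, List.map_append, List.map_singleton]
  simp [PySem.Set.ofList, List.foldl_append]

lemma pvStepB_tab (m : List Char) (j : Nat) (h1 : 1 ≤ j) (h2 : j < m.length) :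
    pvStepB m (pvTab m j, pvDist m (j - 1)) (j : Int) = (pvTab m (j + 1), pvDist m j) := by
  have hmj : PySem.List.pyGetD m (j : Int) ' ' = m.getD j ' ' := by
    rw [PySem.List.pyGetD_natCast]
  have hcast : (j : Int) - 1 = ((j - 1 : Nat) : Int) := by omega
  have hm1 : PySem.List.pyGetD m ((j : Int) - 1) ' ' = m.getD (j - 1) ' ' := by
    rw [hcast, PySem.List.pyGetD_natCast]
  simp only [pvStepB, hmj, hm1, PySem.List.slice_to_natCast,
    pvDist_step m j h1 (by omega)]
  -- the computed need is exactly the number of distinct prefix characters not yet seen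
  have hD : (pvDist m j : List String).Nodup := PySem.Set.nodup_ofList _
  have hpred : ∀ z y : String,
      (!(PySem.Set.contains (PySem.Set.ofList [z]) y)) = (y != z) := by
    intro z y
    simp only [PySem.Set.contains]
    rw [show PySem.Set.ofList [z] = [z] from rfl]
    by_cases h : y = z
    · subst h
      rw [List.contains_iff_mem.2 (List.mem_singleton_self y)]
      simp [bne]
    · have hcf : List.contains [z] y = false := by
        rw [← Bool.not_eq_true]
        intro hct
        exact h (List.mem_singleton.1 (List.contains_iff_mem.1 hct))
      rw [hcf]
      simp [bne, beq_eq_false_iff_ne.2 h]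
  have hneed : PySem.Set.len (pvDist m j)
      - (if PySem.Set.contains (pvDist m j) (String.singleton (m.getD j ' ')) then (1 : Int) else 0)
      = (((pvDist m j : List String).filter
          (fun y => !(PySem.Set.contains (PySem.Set.ofList [String.singleton (m.getD j ' ')]) y))).length : Int) := by
    have hf : ((pvDist m j : List String).filter
        (fun y => !(PySem.Set.contains (PySem.Set.ofList [String.singleton (m.getD j ' ')]) y)))
        = (pvDist m j : List String).filter (fun y => y != String.singleton (m.getD j ' ')) := by
      apply List.filter_congr
      intro y _
      exact hpred (String.singleton (m.getD j ' ')) y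
    rw [hf, ← hD.erase_eq_filter]
    by_cases hcj : String.singleton (m.getD j ' ') ∈ (pvDist m j : List String)
    · rw [if_pos (by simpa [PySem.Set.contains, List.contains_iff_mem] using hcj)]
      rw [List.length_erase_of_mem hcj]
      have := List.length_pos_of_mem hcj
      simp only [PySem.Set.len]
      omega
    · rw [if_neg (by simpa [PySem.Set.contains, List.contains_iff_mem] using hcj)]
      rw [List.erase_of_not_mem hcj]
      simp [PySem.Set.len]
  rw [hneed]
  rw [pvScan_eq_full (pvDist m j) hD (m.take j).reverse _ 1 _
    (fun c hc => by
      rw [pvDist, PySem.Set.mem_ofList]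
      exact List.mem_map.2 ⟨c, List.mem_reverse.1 hc, rfl⟩)
    rfl]
  -- from here on this is the unbroken scan: same computation as pvEnt m j
  have hfresh : ∀ p ∈ pvEnt m j,
      (⟨[("autre", (j : Int) + 1)]⟩ : PySem.Dict String Int).contains p.1 = false := by
    intro p hp
    obtain ⟨⟨c, hc⟩, _⟩ := pvEnt_key m j p hp
    simp only [PySem.Dict.contains, List.any_cons, List.any_nil, Bool.or_false]
    rw [hc]
    exact autre_beq_sing c
  have hfold := foldl_insert_items (pvEnt m j) ⟨[("autre", (j : Int) + 1)]⟩
    hfresh (pvEnt_pairwise m j)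
  have hdico : (pvEnt m j).foldl (fun d (p : String × Int) => d.insert p.1 p.2)
      (PySem.Dict.ofList [("autre", (j : Int) + 1)]) = ⟨pvBd m j⟩ := by
    have hof1 : PySem.Dict.ofList [("autre", (j : Int) + 1)]
        = (⟨[("autre", (j : Int) + 1)]⟩ : PySem.Dict String Int) := rfl
    rw [hof1]
    calc (pvEnt m j).foldl (fun d (p : String × Int) => d.insert p.1 p.2)
          (⟨[("autre", (j : Int) + 1)]⟩ : PySem.Dict String Int)
        = ⟨((pvEnt m j).foldl (fun d (p : String × Int) => d.insert p.1 p.2)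
          (⟨[("autre", (j : Int) + 1)]⟩ : PySem.Dict String Int)).items⟩ := rfl
      _ = ⟨pvBd m j⟩ := by rw [hfold]; rfl
  rw [show (pvScanFull (m.take j).reverse
      (PySem.Set.ofList [String.singleton (m.getD j ' ')]) 1).reverse = pvEnt m j from rfl]
  rw [hdico, pvTab, pvTab, List.range_succ, List.map_append]
  rfl

lemma pvLoop {σ : Type} (n : Nat) (f : σ → Int → σ) (st : Nat → σ)
    (hf : ∀ j : Nat, 1 ≤ j → j < n → f (st j) (j : Int) = st (j + 1)) :
    ∀ j : Nat, 1 ≤ j → j ≤ n →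
      (PySem.List.pyRange (j : Int) (n : Int) 1).foldl f (st j) = st n := by
  intro j h1 h2
  induction hn : n - j generalizing j with
  | zero =>
    have hj : j = n := by omega
    subst hj
    rw [PySem.List.pyRange_one_eq_nil le_rfl]
    rfl
  | succ n' ih =>
    have hlt : j < n := by omega
    rw [PySem.List.pyRange_one_cons (by exact_mod_cast hlt), List.foldl_cons, hf j h1 hlt]
    have : ((j : Int) + 1) = ((j + 1 : Nat) : Int) := by omega
    rw [this]
    exact ih (j + 1) (by omega) (by omega) (by omega)

-- ===== VERDICT (by name: the statement is the Claim_ definition above) =====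
theorem table_de_decalage_spec : Claim_equal_table_de_decalage := by
  intro motif _
  unfold Spec_table_de_decalage table_de_decalage table_de_decalage_alt
  rw [PySem.Str.len_eq]
  by_cases h0 : motif.toList.length = 0
  · rw [h0]
    rw [PySem.List.pyRange_one_eq_nil (by norm_num)]
    rfl
  · have h1 : 1 ≤ motif.toList.length := by omega
    have hinitA : [PySem.Dict.ofList [(("autre" : String), (1 : Int))]]
        = pvTab motif.toList 1 := by
      simp [pvTab, pvBd, pvEnt, List.range_one]
      rfl
    rw [hinitA, show (PySem.Set.empty : PySem.Set String) = pvDist motif.toList 0 from rfl]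
    have hA := pvLoop motif.toList.length (pvStepA motif.toList)
      (fun i => pvTab motif.toList i)
      (fun j hj1 hj2 => pvStepA_tab motif.toList j hj1 hj2) 1 le_rfl h1
    have hB := pvLoop motif.toList.length (pvStepB motif.toList)
      (fun i => (pvTab motif.toList i, pvDist motif.toList (i - 1)))
      (fun j hj1 hj2 => by
        simp only [Nat.add_sub_cancel]
        exact pvStepB_tab motif.toList j hj1 hj2) 1 le_rfl h1
    simp only at hA hB
    rw [show ((1 : Nat) : Int) = (1 : Int) by norm_num] at hA hB
    rw [hA, hB]
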